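-- pv_equiv track=rewrite | github.com/Schro-code/AdventCodePython | adventcode/day14.py | get_all_adresses
-- ===== SOURCE A (Python) =====
-- def get_all_adresses(adress, index = 0):
-- 	list_of_adresses = []
-- 	if adress.isnumeric():
-- 		return [adress]
-- 	while index < len(adress):
-- 		if adress[index] == "X":
-- 			adress_0 = adress[: index] + "0" + adress[index+1:]
-- 			list_of_adresses += get_all_adresses(adress_0,index)
-- 			adress_1 = adress[: index] + "1" + adress[index+1:]
-- 			list_of_adresses += get_all_adresses(adress_1,index)
-- 		index +=1
-- 	return list_of_adresses
-- ===== SOURCE B (Python) =====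
-- def get_all_adresses(adress, index=0):
--     if adress.isnumeric():
--         return [adress]
--     p = adress.find("X", index)
--     if p == -1:
--         return []
--     return (get_all_adresses(adress[:p] + "0" + adress[p+1:], p)
--             + get_all_adresses(adress[:p] + "1" + adress[p+1:], p))
-- ===== Notes on version B (the rewrite author's own statement) =====
-- stated objective: faster
-- what changed: A scans the whole string with a while loop and recursively re-expands at EVERY X position it passes (all branches after the first X collapse to [] but still do exponential work); B finds only the FIRST X from the start position and splits once into the 0- and 1-substitution, recursing from there. Pre_ excludes negative index on non-numeric addresses containing an X (Python's negative-index wraparound makes A duplicate results or recurse forever) and index < -len on X-free non-numeric addresses (A raises IndexError).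
-- outside the precondition, e.g. on get_all_adresses('X0', -2): A returns ['00', '10', '00', '10'], B returns ['00', '10']; on get_all_adresses('a', -2): A raises IndexError, B returns []
import Mathlib
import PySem

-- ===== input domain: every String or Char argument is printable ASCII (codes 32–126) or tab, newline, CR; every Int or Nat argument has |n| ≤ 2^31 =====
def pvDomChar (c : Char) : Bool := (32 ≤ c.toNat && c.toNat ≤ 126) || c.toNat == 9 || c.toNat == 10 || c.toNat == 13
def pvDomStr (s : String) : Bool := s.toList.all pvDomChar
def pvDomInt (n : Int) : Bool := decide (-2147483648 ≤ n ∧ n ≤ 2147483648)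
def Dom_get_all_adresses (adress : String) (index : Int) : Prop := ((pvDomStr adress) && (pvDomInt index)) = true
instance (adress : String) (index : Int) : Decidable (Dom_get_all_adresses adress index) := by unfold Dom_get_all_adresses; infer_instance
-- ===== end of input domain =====

-- B replaces A's whole-string rescanning recursion (which re-expands at every X it passes) by a
-- single find of the FIRST X followed by one binary split (objective: faster).

-- ===== PORT A =====
def pvCountX (s : List Char) : Nat := s.countP (fun c => c == 'X')

-- A's recursion does not terminate structurally (on index = -1 the Python itself recurses without
-- bound), so the port carries fuel — a totality guard only: the top-level fuel is shown below to
-- be enough for every input admitted by Pre_, and the port never switches algorithms.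
mutual
-- body of get_all_adresses on the code points: `if adress.isnumeric(): return [adress]`, then the
-- while loop.  isnumeric agrees with isdigit on the printable-ASCII domain Dom_, so strIsdigit is
-- exact here.
def pvGoA : Nat → List Char → Int → List (List Char)
  | 0, _, _ => []
  | fuel+1, s, index =>
    if PySem.Chars.strIsdigit s then [s]
    else pvLoopA fuel s index []
-- the while loop over index, with the accumulator list_of_adresses
def pvLoopA : Nat → List Char → Int → List (List Char) → List (List Char)
  | 0, _, _, acc => acc
  | fuel+1, s, index, acc =>
    if index < (s.length : Int) then
      match PySem.List.pyGet? s index with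
      | some c =>
        if c = 'X' then
          -- adress_0 = adress[: index] + "0" + adress[index+1:]   (and the "1" twin)
          let s0 := PySem.List.slice s none (some index) ++ '0' :: PySem.List.slice s (some (index+1)) none
          let s1 := PySem.List.slice s none (some index) ++ '1' :: PySem.List.slice s (some (index+1)) none
          pvLoopA fuel s (index+1) (acc ++ pvGoA fuel s0 index ++ pvGoA fuel s1 index)
        else pvLoopA fuel s (index+1) acc
      | none => acc   -- Python raises IndexError here (index < -len(adress)); outside Pre_
    else acc
end

def get_all_adresses (adress : String) (index : Int) : List String :=
  (pvGoA (pvCountX adress.toList * (adress.toList.length + 2) + 2 * adress.toList.length + 3)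
    adress.toList index).map String.ofList

-- ===== PORT B =====
-- Source B's recursion always terminates (each call replaces one 'X' by a bit), but that fact is not
-- structural, so the port carries fuel -- a totality guard only: the top-level fuel (#X's + 1) is
-- shown below to be enough on every input, and the port never switches algorithms.
-- body of get_all_adresses on the code points: `if adress.isnumeric(): return [adress]`,
-- `p = adress.find("X", index)`, and the binary split at the first X.
def pvGoB : Nat → List Char → Int → List (List Char)
  | 0, _, _ => []
  | fuel+1, s, i =>
    if PySem.Chars.strIsdigit s then [s]
    else
      let p := PySem.Chars.findFrom s ['X'] i
      if p = -1 then []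
      else
        pvGoB fuel (PySem.List.slice s none (some p) ++ '0' :: PySem.List.slice s (some (p+1)) none) p
          ++ pvGoB fuel (PySem.List.slice s none (some p) ++ '1' :: PySem.List.slice s (some (p+1)) none) p

def get_all_adresses_alt (adress : String) (index : Int) : List String :=
  (pvGoB (pvCountX adress.toList + 1) adress.toList index).map String.ofList

-- ===== PRECONDITION & SPEC =====
-- Pre_ excludes negative index arguments on non-numeric addresses containing an 'X' (there A
-- either recurses without bound or returns accidentally duplicated expansions caused by Python's
-- negative-index wraparound) and index < -len(adress) on non-numeric X-free addresses (there A
-- raises IndexError).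
def Pre_get_all_adresses (adress : String) (index : Int) : Prop :=
  0 ≤ index ∨ PySem.Chars.strIsdigit adress.toList = true ∨
    ('X' ∉ adress.toList ∧ -(adress.toList.length : Int) ≤ index)
instance (adress : String) (index : Int) : Decidable (Pre_get_all_adresses adress index) := by
  unfold Pre_get_all_adresses; infer_instance

def pvWitness_get_all_adresses : String × Int := ("X0", 0)

def Spec_get_all_adresses (adress : String) (index : Int) (out : List String) : Prop := out = get_all_adresses_alt adress index
instance (adress : String) (index : Int) (out : List String) : Decidable (Spec_get_all_adresses adress index out) := by unfold Spec_get_all_adresses; infer_instance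

-- ===== CLAIM (what is proved, stated in full; the proofs are below) =====
def Claim_equal_get_all_adresses : Prop := ∀ (adress : String) (index : Int), Dom_get_all_adresses adress index → Pre_get_all_adresses adress index → Spec_get_all_adresses adress index (get_all_adresses adress index)

-- ===== LEMMAS AND PROOFS =====

-- proof-side characterisation of both programs: the product expansion over the X positions
def pvSetBit (t : List Char) (p : Nat) (b : Char) : List Char := t.take p ++ b :: t.drop (p+1)

def pvXpos (s : List Char) : List Nat :=
  (PySem.List.enumerate s).filterMap (fun ic => if ic.2 = 'X' then some ic.1.toNat else none)

def pvExpand (xs : List Nat) (out : List (List Char)) : List (List Char) :=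
  xs.foldl (fun out p => out.flatMap (fun t => ['0', '1'].map (pvSetBit t p))) out

def pvAltCore (s : List Char) (index : Int) : List (List Char) :=
  if ¬ (s.all (fun c => c == 'X' || PySem.Chars.isdigit c) = true) then []
  else
    match pvXpos s with
    | [] => []
    | p :: ps => if (p : Int) < index then [] else pvExpand (p :: ps) [s]

-- the value of a full recursive call of A, for index ≥ 0 (proof-side abbreviation)
def pvV (s : List Char) (index : Int) : List (List Char) :=
  if PySem.Chars.strIsdigit s then [s] else pvAltCore s index

lemma pvStrIsdigit_false_at {s : List Char} {p : Nat} (h : p < s.length)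
    (hd : PySem.Chars.isdigit (s.getD p 'a') = false) : PySem.Chars.strIsdigit s = false := by
  have hmem : s.getD p 'a' ∈ s := by
    rw [List.getD_eq_getElem s 'a' h]; exact List.getElem_mem h
  rw [PySem.Chars.strIsdigit, List.all_eq_false.2 ⟨_, hmem, fun ht => by rw [ht] at hd; exact absurd hd (by decide)⟩, Bool.and_false]

lemma pvFilterMap_guard {p : Nat → Bool} : ∀ l : List Nat,
    l.filterMap (fun k => if p k then some k else none) = l.filter p := by
  intro l; induction l with
  | nil => rfl
  | cons a l ih => by_cases h : p a <;> simp [h, ih]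

lemma pvXpos_eq (s : List Char) :
    pvXpos s = (List.range s.length).filter (fun p => s.getD p 'a' == 'X') := by
  rw [pvXpos, PySem.List.enumerate_eq_map_pyRange s 'a', PySem.List.len_eq,
    PySem.List.pyRange_zero_natCast, List.filterMap_map, List.filterMap_map, ← pvFilterMap_guard]
  apply List.filterMap_congr
  intro k hk
  simp [PySem.List.pyGetD_natCast]

lemma pvMem_xpos {s : List Char} {p : Nat} :
    p ∈ pvXpos s ↔ p < s.length ∧ s.getD p 'a' = 'X' := by
  simp [pvXpos_eq, List.mem_filter]

lemma pvXpos_pairwise (s : List Char) : (pvXpos s).Pairwise (· < ·) := by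
  rw [pvXpos_eq]
  exact (List.pairwise_lt_range).filter _

lemma pvSetBit_eq_set {s : List Char} {i : Nat} (h : i < s.length) (b : Char) :
    pvSetBit s i b = s.set i b := (List.set_eq_take_cons_drop b h).symm

lemma pvSetBit_length {s : List Char} {i : Nat} (h : i < s.length) (b : Char) :
    (pvSetBit s i b).length = s.length := by
  simp [pvSetBit_eq_set h]

lemma pvSetBit_getD {s : List Char} {i : Nat} (h : i < s.length) (b : Char) (q : Nat) (d : Char) :
    (pvSetBit s i b).getD q d = if q = i then b else s.getD q d := by
  rw [pvSetBit_eq_set h, List.getD_eq_getElem?_getD, List.getElem?_set]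
  split_ifs with h1 h2 h3
  · simp
  · omega
  · subst h3; omega
  · rw [List.getD_eq_getElem?_getD]

lemma pvXpos_setBit {s : List Char} {i : Nat} (h : i < s.length) {b : Char} (hb : b ≠ 'X') :
    pvXpos (pvSetBit s i b) = (pvXpos s).filter (fun q => q ≠ i) := by
  rw [pvXpos_eq, pvXpos_eq, pvSetBit_length h, List.filter_filter]
  apply List.filter_congr
  intro q hq
  rw [pvSetBit_getD h]
  by_cases hqi : q = i <;> simp [hqi, hb]

lemma pvExpand_cons (p : Nat) (xs : List Nat) (out : List (List Char)) :
    pvExpand (p :: xs) out = pvExpand xs (out.flatMap (fun t => ['0', '1'].map (pvSetBit t p))) := rfl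

lemma pvExpand_append (xs : List Nat) : ∀ o₁ o₂ : List (List Char),
    pvExpand xs (o₁ ++ o₂) = pvExpand xs o₁ ++ pvExpand xs o₂ := by
  induction xs with
  | nil => intro o₁ o₂; rfl
  | cons p xs ih =>
      intro o₁ o₂
      rw [pvExpand_cons, pvExpand_cons, pvExpand_cons, List.flatMap_append, ih]

lemma pvAltCore_end {s : List Char} {i : Int} (h : (s.length : Int) ≤ i) :
    pvAltCore s i = [] := by
  rw [pvAltCore]
  split_ifs with h1
  · split
    · rfl
    · next p ps hx =>
        have hp : p < s.length := (pvMem_xpos.1 (hx ▸ List.mem_cons_self ..)).1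
        rw [if_pos (by omega)]
  · rfl

lemma pvXpos_head_min {s : List Char} {p : Nat} {ps : List Nat} (h : pvXpos s = p :: ps) :
    ∀ q ∈ pvXpos s, p ≤ q := by
  intro q hq
  have hpw := pvXpos_pairwise s
  rw [h] at hq hpw
  rcases List.mem_cons.1 hq with rfl | hq'
  · exact le_rfl
  · exact ((List.pairwise_cons.1 hpw).1 q hq').le

lemma pvAltCore_skip {s : List Char} {i : Int} (h0 : 0 ≤ i) (h1 : i.toNat < s.length)
    (hc : s.getD i.toNat 'a' ≠ 'X') : pvAltCore s i = pvAltCore s (i + 1) := by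
  rw [pvAltCore, pvAltCore]
  split_ifs with hall
  · split
    · rfl
    · next p ps hx =>
        have hpmem := pvMem_xpos.1 (hx ▸ List.mem_cons_self ..)
        have hpi : (p : Int) ≠ i := by
          intro he
          exact hc (by rw [show i.toNat = p by omega]; exact hpmem.2)
        by_cases hlt : (p : Int) < i
        · rw [if_pos hlt, if_pos (by omega)]
        · rw [if_neg hlt, if_neg (by omega)]
  · rfl

lemma pvAltCore_dead {s : List Char} {i : Int} {p : Nat} (hp : p < s.length)
    (hX : s.getD p 'a' = 'X') (hlt : (p : Int) < i) : pvAltCore s i = [] := by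
  rw [pvAltCore]
  split_ifs with h1
  · split
    · rfl
    · next q qs hx =>
        have hq : q ≤ p := pvXpos_head_min hx p (pvMem_xpos.2 ⟨hp, hX⟩)
        rw [if_pos (by omega)]
  · rfl

lemma pvAllOk_setBit_false {s : List Char} {n : Nat} (hn : n < s.length)
    (hX : s.getD n 'a' = 'X') {b : Char}
    (hall : ¬ (s.all (fun c => c == 'X' || PySem.Chars.isdigit c) = true)) :
    ¬ ((pvSetBit s n b).all (fun c => c == 'X' || PySem.Chars.isdigit c) = true) := by
  intro h2
  apply hall
  rw [List.all_eq_true] at h2 ⊢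
  intro c hc
  rcases List.mem_iff_getElem.1 hc with ⟨q, hq, rfl⟩
  by_cases hqn : q = n
  · subst hqn
    rw [← List.getD_eq_getElem s 'a' hq, hX]; decide
  · have := h2 ((pvSetBit s n b).getD q 'a') (by
      rw [List.getD_eq_getElem _ 'a' (by rw [pvSetBit_length hn]; exact hq)]
      exact List.getElem_mem _)
    rwa [pvSetBit_getD hn, if_neg hqn, List.getD_eq_getElem s 'a' hq] at this

lemma pvAllOk_setBit_true {s : List Char} {n : Nat} (hn : n < s.length) {b : Char}
    (hb : (b == 'X' || PySem.Chars.isdigit b) = true)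
    (hall : s.all (fun c => c == 'X' || PySem.Chars.isdigit c) = true) :
    (pvSetBit s n b).all (fun c => c == 'X' || PySem.Chars.isdigit c) = true := by
  rw [List.all_eq_true] at hall ⊢
  intro c hc
  rcases List.mem_iff_getElem.1 hc with ⟨q, hq, rfl⟩
  rw [pvSetBit_length hn] at hq
  rw [← List.getD_eq_getElem _ 'a' (by rwa [pvSetBit_length hn]), pvSetBit_getD hn]
  by_cases hqn : q = n
  · rwa [if_pos hqn]
  · rw [if_neg hqn, List.getD_eq_getElem s 'a' hq]
    exact hall _ (List.getElem_mem hq)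

lemma pvStrIsdigit_true_of_ok {s : List Char} (hne : s ≠ [])
    (hall : s.all (fun c => c == 'X' || PySem.Chars.isdigit c) = true)
    (hx : pvXpos s = []) : PySem.Chars.strIsdigit s = true := by
  rw [PySem.Chars.strIsdigit, Bool.and_eq_true, List.all_eq_true]
  constructor
  · simpa using hne
  · intro c hc
    rcases List.mem_iff_getElem.1 hc with ⟨q, hq, rfl⟩
    have hcok := List.all_eq_true.1 hall _ (List.getElem_mem hq)
    rcases Bool.or_eq_true_iff.1 hcok with h | h
    · exfalso
      have : q ∈ pvXpos s := pvMem_xpos.2 ⟨hq, by rw [List.getD_eq_getElem s 'a' hq]; exact beq_iff_eq.1 h⟩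
      rw [hx] at this; exact absurd this (List.not_mem_nil)
    · exact h

lemma pvAltCore_cons {s : List Char} {i : Int} {p : Nat} {ps : List Nat}
    (hall : s.all (fun c => c == 'X' || PySem.Chars.isdigit c) = true)
    (hxp : pvXpos s = p :: ps) :
    pvAltCore s i = if (p : Int) < i then [] else pvExpand (p :: ps) [s] := by
  rw [pvAltCore, if_neg (by simp [hall])]
  split
  · next h => rw [hxp] at h; cases h
  · next q qs h => rw [hxp] at h; cases h; rfl

lemma pvAltCore_step {s : List Char} {i : Int} (h0 : 0 ≤ i) (h1 : i.toNat < s.length)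
    (hX : s.getD i.toNat 'a' = 'X') :
    pvAltCore s i = pvV (pvSetBit s i.toNat '0') i ++ pvV (pvSetBit s i.toNat '1') i := by
  by_cases hall : s.all (fun c => c == 'X' || PySem.Chars.isdigit c) = true
  · -- the string is made of digits and X's
    have hnx : i.toNat ∈ pvXpos s := pvMem_xpos.2 ⟨h1, hX⟩
    rcases hxp : pvXpos s with _ | ⟨p, ps⟩
    · rw [hxp] at hnx; exact absurd hnx (List.not_mem_nil)
    have hpn : p ≤ i.toNat := pvXpos_head_min hxp _ hnx
    have hsX : s.getD p 'a' = 'X' := (pvMem_xpos.1 (hxp ▸ List.mem_cons_self ..)).2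
    have hp : p < s.length := (pvMem_xpos.1 (hxp ▸ List.mem_cons_self ..)).1
    by_cases hpi : (p : Int) < i
    · -- an X strictly before index survives in both substituted strings: everything is []
      have hpne : p ≠ i.toNat := by omega
      have hside : ∀ b : Char, b ≠ 'X' → pvV (pvSetBit s i.toNat b) i = [] := by
        intro b hb
        have hlen : p < (pvSetBit s i.toNat b).length := by rwa [pvSetBit_length h1]
        have hgd : (pvSetBit s i.toNat b).getD p 'a' = 'X' := by
          rw [pvSetBit_getD h1, if_neg hpne, hsX]
        rw [pvV, pvStrIsdigit_false_at hlen (by rw [hgd]; decide), if_neg (by decide)]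
        exact pvAltCore_dead hlen hgd hpi
      rw [pvAltCore_cons hall hxp, if_pos hpi,
        hside '0' (by decide), hside '1' (by decide)]
      rfl
    · -- the first X is exactly at index
      have hpeq : p = i.toNat := by omega
      rw [← hpeq] at h1 hX ⊢
      have hgt : ∀ q ∈ ps, p < q := by
        have hpw := pvXpos_pairwise s
        rw [hxp] at hpw
        exact (List.pairwise_cons.1 hpw).1
      have hxe : ∀ b : Char, b ≠ 'X' → pvXpos (pvSetBit s p b) = ps := by
        intro b hb
        rw [pvXpos_setBit h1 hb, hxp, List.filter_cons]
        simp only [ne_eq, not_true_eq_false, decide_false]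
        exact List.filter_eq_self.2 (fun q hq => by simp [Nat.ne_of_gt (hgt q hq)])
      have hok : ∀ b : Char, (b == 'X' || PySem.Chars.isdigit b) = true →
          (pvSetBit s p b).all (fun c => c == 'X' || PySem.Chars.isdigit c) = true :=
        fun b hb => pvAllOk_setBit_true h1 hb hall
      rcases hq : ps with _ | ⟨q, qs⟩
      · -- unique X: both substituted strings are all-digit
        have hside : ∀ b : Char, b ≠ 'X' → (b == 'X' || PySem.Chars.isdigit b) = true →
            pvV (pvSetBit s p b) i = [pvSetBit s p b] := by
          intro b hb hbd
          rw [pvV, if_pos (pvStrIsdigit_true_of_ok (by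
              have := pvSetBit_length h1 b; intro he; rw [he] at this; simp at this; omega)
            (hok b hbd) (by rw [hxe b hb, hq]))]
        rw [pvAltCore_cons hall hxp, hq, if_neg hpi,
          hside '0' (by decide) (by decide), hside '1' (by decide) (by decide),
          pvExpand_cons]
        simp [pvExpand, pvSetBit]
      · -- more X's behind: both sides expand the remaining positions
        have hqs : q ∈ pvXpos s := by rw [hxp, hq]; exact List.mem_cons_of_mem _ (List.mem_cons_self ..)
        have hqX : s.getD q 'a' = 'X' := (pvMem_xpos.1 hqs).2
        have hql : q < s.length := (pvMem_xpos.1 hqs).1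
        have hpq : p < q := hgt q (by rw [hq]; exact List.mem_cons_self ..)
        have hside : ∀ b : Char, b ≠ 'X' → (b == 'X' || PySem.Chars.isdigit b) = true →
            pvV (pvSetBit s p b) i = pvExpand (q :: qs) [pvSetBit s p b] := by
          intro b hb hbd
          have hlenq : q < (pvSetBit s p b).length := by rwa [pvSetBit_length h1]
          have hgdq : (pvSetBit s p b).getD q 'a' = 'X' := by
            rw [pvSetBit_getD h1, if_neg (by omega), hqX]
          rw [pvV, pvStrIsdigit_false_at hlenq (by rw [hgdq]; decide), if_neg (by decide),
            pvAltCore_cons (hok b hbd) (by rw [hxe b hb, hq]),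
            if_neg (by omega)]
        rw [pvAltCore_cons hall hxp, hq, if_neg hpi,
          hside '0' (by decide) (by decide), hside '1' (by decide) (by decide),
          pvExpand_cons]
        have : ([s].flatMap (fun t => ['0', '1'].map (pvSetBit t p))) =
            [pvSetBit s p '0'] ++ [pvSetBit s p '1'] := by simp
        rw [this, pvExpand_append]
  · -- a character that is neither a digit nor X: everything is []
    have hside : ∀ b : Char, pvV (pvSetBit s i.toNat b) i = [] := by
      intro b
      have hallb := pvAllOk_setBit_false h1 hX (b := b) hall
      rcases List.all_eq_false.1 (Bool.eq_false_iff.2 hallb) with ⟨c, hc, hcb⟩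
      have hcd : PySem.Chars.isdigit c = false := by
        revert hcb; cases PySem.Chars.isdigit c <;> simp
      rcases List.mem_iff_getElem.1 hc with ⟨r, hr, rfl⟩
      rw [pvV, pvStrIsdigit_false_at (p := r) hr (by
          rw [List.getD_eq_getElem _ 'a' hr]; exact hcd), if_neg (by decide), pvAltCore,
        if_pos hallb]
    rw [pvAltCore, if_pos hall, hside '0', hside '1']
    rfl

lemma pvCountX_setBit {s : List Char} {n : Nat} {b : Char} (h : n < s.length)
    (hX : s.getD n 'a' = 'X') (hb : b ≠ 'X') :
    pvCountX s = pvCountX (pvSetBit s n b) + 1 := by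
  have hdrop := List.drop_eq_getElem_cons h
  have hsn : s[n] = 'X' := by rw [← List.getD_eq_getElem s 'a' h, hX]
  rw [pvCountX, pvCountX, pvSetBit]
  conv_lhs => rw [← List.take_append_drop n s, hdrop]
  rw [List.countP_append, List.countP_append, List.countP_cons, List.countP_cons]
  simp [hsn, hb]
  omega

-- reduction shapes of the ported loop
lemma pvGoA_succ (f : Nat) (s : List Char) (i : Int) :
    pvGoA (f+1) s i = if PySem.Chars.strIsdigit s then [s] else pvLoopA f s i [] := rfl

lemma pvLoopA_succ_end (f : Nat) (s : List Char) (i : Int) (acc : List (List Char))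
    (h : ¬ i < (s.length : Int)) : pvLoopA (f+1) s i acc = acc := by
  rw [pvLoopA, if_neg h]

lemma pvLoopA_succ_skip (f : Nat) (s : List Char) (i : Int) (acc : List (List Char)) {c : Char}
    (hiL : i < (s.length : Int)) (hget : PySem.List.pyGet? s i = some c) (hc : c ≠ 'X') :
    pvLoopA (f+1) s i acc = pvLoopA f s (i+1) acc := by
  rw [pvLoopA, if_pos hiL]
  split
  · next c' heq => rw [hget] at heq; cases heq; rw [if_neg hc]
  · next heq => rw [hget] at heq; cases heq

lemma pvLoopA_succ_X (f : Nat) (s : List Char) (i : Int) (acc : List (List Char)) {c : Char}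
    (hiL : i < (s.length : Int)) (hget : PySem.List.pyGet? s i = some c) (hc : c = 'X') :
    pvLoopA (f+1) s i acc = pvLoopA f s (i+1) (acc
      ++ pvGoA f (PySem.List.slice s none (some i) ++ '0' :: PySem.List.slice s (some (i+1)) none) i
      ++ pvGoA f (PySem.List.slice s none (some i) ++ '1' :: PySem.List.slice s (some (i+1)) none) i) := by
  rw [pvLoopA, if_pos hiL]
  split
  · next c' heq => rw [hget] at heq; cases heq; rw [if_pos hc]
  · next heq => rw [hget] at heq; cases heq

-- with enough fuel the ported loop computes pvAltCore, and the ported call computes pvV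
lemma pvFuel_main : ∀ fuel : Nat,
    (∀ (s : List Char) (i : Int) (acc : List (List Char)), 0 ≤ i →
      pvCountX s * (s.length + 2) + (s.length - i.toNat) + 2 ≤ fuel →
      pvLoopA fuel s i acc = acc ++ pvAltCore s i) ∧
    (∀ (s : List Char) (i : Int), 0 ≤ i →
      pvCountX s * (s.length + 2) + (s.length - i.toNat) + 3 ≤ fuel →
      pvGoA fuel s i = pvV s i) := by
  intro fuel
  induction fuel with
  | zero => exact ⟨fun s i acc _ h => absurd h (by omega), fun s i _ h => absurd h (by omega)⟩
  | succ f ih =>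
    obtain ⟨ihL, ihG⟩ := ih
    constructor
    · intro s i acc h0 hb
      by_cases hiL : i < (s.length : Int)
      case neg =>
        rw [pvLoopA_succ_end f s i acc hiL, pvAltCore_end (by omega), List.append_nil]
      case pos =>
        have hn : i.toNat < s.length := by omega
        have hget : PySem.List.pyGet? s i = some (s.getD i.toNat 'a') := by
          rw [PySem.List.pyGet?_of_nonneg s h0, List.getElem?_eq_getElem hn,
            List.getD_eq_getElem s 'a' hn]
        by_cases hc : s.getD i.toNat 'a' = 'X'
        · -- the loop meets an X: two recursive expansions, then the tail of the loop
          have hs : ∀ b : Char,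
              PySem.List.slice s none (some i) ++ b :: PySem.List.slice s (some (i+1)) none =
                pvSetBit s i.toNat b := by
            intro b
            rw [PySem.List.slice_to s h0, PySem.List.slice_from s (by omega), pvSetBit,
              show (i+1).toNat = i.toNat + 1 by omega]
          have hk0 := pvCountX_setBit hn hc (b := '0') (by decide)
          have hk1 := pvCountX_setBit hn hc (b := '1') (by decide)
          have hlen : ∀ b : Char, (pvSetBit s i.toNat b).length = s.length :=
            fun b => pvSetBit_length hn b
          rw [pvLoopA_succ_X f s i acc hiL hget hc, hs '0', hs '1',
            ihG _ i h0 (by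
              rw [hlen '0']
              have hmul : pvCountX s * (s.length+2) =
                  pvCountX (pvSetBit s i.toNat '0') * (s.length+2) + (s.length+2) := by
                rw [hk0]; ring
              omega),
            ihG _ i h0 (by
              rw [hlen '1']
              have hmul : pvCountX s * (s.length+2) =
                  pvCountX (pvSetBit s i.toNat '1') * (s.length+2) + (s.length+2) := by
                rw [hk1]; ring
              omega),
            ihL s (i+1) _ (by omega) (by
              have : (i+1).toNat = i.toNat + 1 := by omega
              rw [this]; omega),
            pvAltCore_dead hn hc (by omega), List.append_nil,
            pvAltCore_step h0 hn hc, List.append_assoc]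
        · rw [pvLoopA_succ_skip f s i acc hiL hget hc,
            ihL s (i+1) acc (by omega) (by
              have : (i+1).toNat = i.toNat + 1 := by omega
              rw [this]; omega),
            pvAltCore_skip h0 hn hc]
    · intro s i h0 hb
      rw [pvGoA_succ, pvV]
      by_cases hdig : PySem.Chars.strIsdigit s = true
      · rw [if_pos hdig, if_pos hdig]
      · rw [if_neg hdig, if_neg hdig, ihL s i [] h0 (by omega), List.nil_append]

-- on an X-free string the loop only scans and returns its accumulator
lemma pvLoopA_noX : ∀ (fuel : Nat) (s : List Char) (i : Int) (acc : List (List Char)),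
    'X' ∉ s → ((s.length : Int) - i).toNat < fuel → pvLoopA fuel s i acc = acc := by
  intro fuel
  induction fuel with
  | zero => intro s i acc _ h; omega
  | succ f ih =>
    intro s i acc hnx hb
    by_cases hiL : i < (s.length : Int)
    case neg => exact pvLoopA_succ_end f s i acc hiL
    case pos =>
      rcases hget : PySem.List.pyGet? s i with _ | c
      · rw [pvLoopA, if_pos hiL, hget]
      · have hc : c ≠ 'X' := fun he =>
          hnx (he ▸ PySem.List.mem_of_pyGet?_eq_some s hget)
        rw [pvLoopA_succ_skip f s i acc hiL hget hc]
        exact ih s (i+1) acc hnx (by omega)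

lemma pvAltCore_xpos_nil {s : List Char} {i : Int} (hx : pvXpos s = []) :
    pvAltCore s i = [] := by
  rw [pvAltCore]
  split_ifs with h
  · split
    · rfl
    · next p ps h2 => rw [hx] at h2; cases h2
  · rfl

-- ===== lemmas about B's port =====

-- a successful adress.find("X", index) points at an 'X' inside the string
lemma pvFindX_spec (s : List Char) (i : Int) (h : PySem.Chars.findFrom s ['X'] i ≠ -1) :
    0 ≤ PySem.Chars.findFrom s ['X'] i ∧ (PySem.Chars.findFrom s ['X'] i).toNat < s.length ∧
      s.getD (PySem.Chars.findFrom s ['X'] i).toNat 'a' = 'X' := by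
  rw [PySem.Chars.findFrom] at h ⊢
  set n : Int := (s.length : Int) with hn
  have hn0 : 0 ≤ n := by rw [hn]; exact Int.natCast_nonneg _
  set st : Int := if i < 0 then if i + n < 0 then 0 else i + n else i with hst
  have hst0 : 0 ≤ st := by
    rw [hst]; split_ifs <;> omega
  by_cases hes : n < st
  · rw [if_pos hes] at h; exact absurd rfl h
  · rw [if_neg hes] at h ⊢
    have htake : s.take n.toNat = s := by
      rw [hn, Int.toNat_natCast]; exact List.take_length
    rw [htake] at h ⊢
    by_cases hrn : PySem.Chars.find (s.drop st.toNat) ['X'] = -1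
    · rw [if_pos hrn] at h; exact absurd rfl h
    · rw [if_neg hrn] at h ⊢
      have hr0 : 0 ≤ PySem.Chars.find (s.drop st.toNat) ['X'] :=
        (PySem.Chars.find_nonneg_iff _ _).2 ((PySem.Chars.find_ne_neg_one_iff _ _).1 hrn)
      obtain ⟨hpre, -⟩ := PySem.Chars.find_spec (s := s.drop st.toNat) (sub := ['X']) hr0
      set r : Int := PySem.Chars.find (s.drop st.toNat) ['X'] with hrdef
      rw [List.drop_drop] at hpre
      rcases hpre with ⟨t, ht⟩
      have hlen : st.toNat + r.toNat < s.length := by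
        have := congrArg List.length ht
        rw [List.length_drop] at this
        simp at this
        omega
      have hgd : s.getD (st.toNat + r.toNat) 'a' = 'X' := by
        have h1 : s.drop (st.toNat + r.toNat) = 'X' :: t := ht.symm
        have h2 : s.drop (st.toNat + r.toNat) = s[st.toNat + r.toNat] :: s.drop (st.toNat + r.toNat + 1) :=
          List.drop_eq_getElem_cons hlen
        rw [List.getD_eq_getElem s 'a' hlen]
        rw [h1] at h2
        exact (List.cons.injEq .. ▸ h2).1.symm
      have htn : (st + r).toNat = st.toNat + r.toNat := by omega
      exact ⟨by omega, by rw [htn]; exact hlen, by rw [htn]; exact hgd⟩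

lemma pvFindFrom_noX {s : List Char} (h : 'X' ∉ s) (i : Int) :
    PySem.Chars.findFrom s ['X'] i = -1 := by
  rw [PySem.Chars.findFrom]
  set n : Int := (s.length : Int) with hn
  set st : Int := if i < 0 then if i + n < 0 then 0 else i + n else i with hst
  by_cases hes : n < st
  · rw [if_pos hes]
  · rw [if_neg hes, if_pos]
    rw [PySem.Chars.find_eq_neg_one_iff]
    intro hinf
    have : 'X' ∈ (s.take n.toNat).drop st.toNat := by
      rcases hinf with ⟨l, r, he⟩
      rw [← he]; simp
    exact h (List.mem_of_mem_take (List.mem_of_mem_drop this))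

-- for 0 ≤ i, a failed find means there is no X at any position ≥ i
lemma pvFindFrom_none_forward {s : List Char} {i : Int} (h0 : 0 ≤ i)
    (h : PySem.Chars.findFrom s ['X'] i = -1) {q : Nat} (hq : q < s.length)
    (hiq : i ≤ (q : Int)) : s.getD q 'a' ≠ 'X' := by
  intro hX
  by_cases hle : i ≤ (s.length : Int)
  · have hk : i = ((i.toNat : Nat) : Int) := by omega
    rw [hk] at h
    have := (PySem.Chars.findFrom_natCast_eq_neg_one_iff s ['X'] i.toNat (by omega)).1 h
    apply this
    have hdrop : ('X' : Char) ∈ s.drop i.toNat := by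
      have : q - i.toNat < (s.drop i.toNat).length := by rw [List.length_drop]; omega
      have hgd : (s.drop i.toNat)[q - i.toNat] = 'X' := by
        rw [List.getElem_drop]
        rw [← List.getD_eq_getElem s 'a' (by omega : i.toNat + (q - i.toNat) < s.length)]
        rw [show i.toNat + (q - i.toNat) = q by omega, hX]
      exact hgd ▸ List.getElem_mem this
    rcases List.mem_iff_append.1 hdrop with ⟨l, r, he⟩
    exact ⟨l, r, by rw [he]; simp⟩
  · omega

-- for 0 ≤ i, a successful find is at position ≥ i and is the FIRST X at position ≥ i
lemma pvFindFrom_first {s : List Char} {i : Int} (h0 : 0 ≤ i)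
    (h : PySem.Chars.findFrom s ['X'] i ≠ -1) :
    i ≤ PySem.Chars.findFrom s ['X'] i ∧
      (∀ q : Nat, i ≤ (q : Int) → (q : Int) < PySem.Chars.findFrom s ['X'] i →
        s.getD q 'a' ≠ 'X') := by
  have hle : i ≤ (s.length : Int) := by
    by_contra hgt
    apply h
    rw [PySem.Chars.findFrom]
    rw [if_pos (by split_ifs <;> omega)]
  have hk : i = ((i.toNat : Nat) : Int) := by omega
  rw [hk] at h ⊢
  obtain ⟨h1, -, h3⟩ := PySem.Chars.findFrom_natCast_spec s ['X'] i.toNat (by omega) h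
  refine ⟨h1, fun q hq1 hq2 => ?_⟩
  intro hX
  have hql : q < s.length := by
    have := pvFindX_spec s ((i.toNat : Nat) : Int) h
    omega
  apply h3 q (by omega) (by
    have h0f := (pvFindX_spec s ((i.toNat : Nat) : Int) h).1
    omega)
  have hdrop : s.drop q = 'X' :: s.drop (q+1) := by
    rw [List.drop_eq_getElem_cons hql, ← List.getD_eq_getElem s 'a' hql, hX]
  exact ⟨s.drop (q+1), hdrop.symm⟩

-- skipping forward over k non-X characters leaves pvAltCore unchanged
lemma pvSkipChain (s : List Char) : ∀ (k : Nat) (i : Int), 0 ≤ i → i.toNat + k ≤ s.length →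
    (∀ q : Nat, i.toNat ≤ q → q < i.toNat + k → s.getD q 'a' ≠ 'X') →
    pvAltCore s i = pvAltCore s (i + k) := by
  intro k
  induction k with
  | zero => intro i h0 _ _; norm_num
  | succ k ih =>
    intro i h0 hlen hno
    have h1 : i.toNat < s.length := by omega
    rw [pvAltCore_skip h0 h1 (hno i.toNat le_rfl (by omega))]
    rw [ih (i+1) (by omega) (by omega) (fun q hq1 hq2 => hno q (by omega) (by omega))]
    congr 1
    omega

-- one reduction step of B's ported recursion
lemma pvGoB_succ (f : Nat) (s : List Char) (i : Int) :
    pvGoB (f+1) s i = if PySem.Chars.strIsdigit s then [s]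
      else if PySem.Chars.findFrom s ['X'] i = -1 then []
      else
        pvGoB f (PySem.List.slice s none (some (PySem.Chars.findFrom s ['X'] i)) ++
            '0' :: PySem.List.slice s (some (PySem.Chars.findFrom s ['X'] i + 1)) none)
            (PySem.Chars.findFrom s ['X'] i) ++
          pvGoB f (PySem.List.slice s none (some (PySem.Chars.findFrom s ['X'] i)) ++
            '1' :: PySem.List.slice s (some (PySem.Chars.findFrom s ['X'] i + 1)) none)
            (PySem.Chars.findFrom s ['X'] i) := rfl

-- with enough fuel B's recursion computes pvV for every nonnegative start index
lemma pvGoB_eq_pvV : ∀ (fuel : Nat) (s : List Char) (i : Int), 0 ≤ i → pvCountX s < fuel →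
    pvGoB fuel s i = pvV s i := by
  intro fuel
  induction fuel with
  | zero => intro s i _ h; omega
  | succ f ih =>
    intro s i h0 hfuel
    rw [pvGoB_succ, pvV]
    by_cases hdig : PySem.Chars.strIsdigit s = true
    · rw [if_pos hdig, if_pos hdig]
    · rw [if_neg hdig, if_neg hdig]
      by_cases hf : PySem.Chars.findFrom s ['X'] i = -1
      · rw [if_pos hf]
        rcases hxp : pvXpos s with _ | ⟨p, ps⟩
        · rw [pvAltCore_xpos_nil hxp]
        · have hpmem := pvMem_xpos.1 (hxp ▸ List.mem_cons_self ..)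
          have hplt : (p : Int) < i := by
            by_contra hge
            exact pvFindFrom_none_forward h0 hf hpmem.1 (by omega) hpmem.2
          rw [pvAltCore_dead hpmem.1 hpmem.2 hplt]
      · rw [if_neg hf]
        obtain ⟨hp0, hplen, hpX⟩ := pvFindX_spec s i hf
        obtain ⟨hip, hfirst⟩ := pvFindFrom_first h0 hf
        set p : Int := PySem.Chars.findFrom s ['X'] i with hpdef
        have hs : ∀ b : Char,
            PySem.List.slice s none (some p) ++ b :: PySem.List.slice s (some (p+1)) none =
              pvSetBit s p.toNat b := by
          intro b
          rw [PySem.List.slice_to s hp0, PySem.List.slice_from s (by omega), pvSetBit,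
            show (p+1).toNat = p.toNat + 1 by omega]
        have hskip : pvAltCore s i = pvAltCore s p := by
          have := pvSkipChain s (p.toNat - i.toNat) i h0 (by omega)
            (fun q hq1 hq2 => hfirst q (by omega) (by omega))
          rw [this, show i + ((p.toNat - i.toNat : Nat) : Int) = p by omega]
        have hk0 := pvCountX_setBit hplen hpX (b := '0') (by decide)
        have hk1 := pvCountX_setBit hplen hpX (b := '1') (by decide)
        rw [hs '0', hs '1',
          ih _ p hp0 (by omega), ih _ p hp0 (by omega),
          hskip, pvAltCore_step hp0 hplen hpX]

-- on an X-free string B's recursion returns [] unless the string is all digits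
lemma pvGoB_noX {s : List Char} (h : 'X' ∉ s) (f : Nat) (i : Int)
    (hdig : PySem.Chars.strIsdigit s ≠ true) : pvGoB (f+1) s i = [] := by
  rw [pvGoB_succ, if_neg hdig, if_pos (pvFindFrom_noX h i)]

-- ===== VERDICT (by name: the statement is the Claim_ definition above) =====
theorem get_all_adresses_spec : Claim_equal_get_all_adresses := by
  intro a i _ hpre
  unfold Spec_get_all_adresses
  rw [get_all_adresses, get_all_adresses_alt]
  by_cases hdig : PySem.Chars.strIsdigit a.toList = true
  · rw [pvGoA_succ, if_pos hdig, pvGoB_succ, if_pos hdig]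
  · rcases hpre with h0 | hd | ⟨hnx, hge⟩
    · rw [(pvFuel_main _).2 a.toList i h0 (by
        have : a.toList.length - i.toNat ≤ a.toList.length := by omega
        omega), pvGoB_eq_pvV _ a.toList i h0 (by omega)]
    · exact absurd hd hdig
    · have hk : pvCountX a.toList = 0 := by
        rw [pvCountX, List.countP_eq_zero]
        intro c hc
        simp only [beq_iff_eq]
        exact fun he => hnx (he ▸ hc)
      rw [pvGoA_succ, if_neg hdig, hk, pvLoopA_noX _ a.toList i [] hnx (by omega),
        pvGoB_noX hnx _ i hdig]
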